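-- pv_equiv track=rewrite | github.com/dials/dials | algorithms/refinement/refinement_helpers.py | string_sel
-- ===== SOURCE A (Python) =====
-- def string_sel(l, full_names, prefix=""):
--     """Provide flexible matching between a list of input strings, l,
--     consisting either of indices or partial names, and a list of full names,
--     with an optional shared prefix. The input list l may arrive from PHIL
--     conversion of the strings type. In that case, comma-separated values will
--     require splitting, and bracket characters will be removed. The values in
--     the processed list l should consist of integers or partial names. Integers
--     will be treated as 0-based indices and partial names will be matched to
--     as many full names as possible. The created selection is returned as a
--     boolean list."""
--
--     sel = [False] * len(full_names)
--     full_names = [prefix + s for s in full_names]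
--
--     # expand elements of the list that are comma separated strings and remove
--     # braces/brackets
--     l = (s.strip("(){}[]") for e in l for s in str(e).split(","))
--     l = (e for e in l if e != "")
--     for e in l:
--         try:
--             i = int(e)
--             sel[i] = True
--             continue
--         except ValueError:
--             pass
--         except IndexError:
--             pass
--         sel = [True if e in name else s for (name, s) in zip(full_names, sel)]
--
--     return sel
-- ===== SOURCE B (Python) =====
-- def string_sel(l, full_names, prefix=""):
--     # Clean the token stream once (same split/strip rules as the original).
--     tokens = [t for e in l for t in (p.strip("(){}[]") for p in str(e).split(",")) if t != ""]
--
--     # Classify each token: an in-range integer becomes a normalized index;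
--     # anything else (including an out-of-range integer) is a partial name.
--     n = len(full_names)
--     idx = set()
--     name_toks = []
--     for t in tokens:
--         try:
--             i = int(t)
--         except ValueError:
--             name_toks.append(t)
--             continue
--         if -n <= i < n:
--             idx.add(i + n if i < 0 else i)
--         else:
--             name_toks.append(t)
--
--     # One final pass builds the selection.
--     return [j in idx or any(t in prefix + name for t in name_toks)
--             for j, name in enumerate(full_names)]
-- ===== Notes on version B (the rewrite author's own statement) =====
-- stated objective: faster
-- what changed: Instead of rebuilding the whole boolean selection list once per token (a substring scan over every name for each non-index token, and a fresh list per token), B classifies the cleaned token stream once into a set of normalized in-range indices and a list of partial-name tokens, then builds the selection in a single final pass over enumerate(full_names).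
import Mathlib
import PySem

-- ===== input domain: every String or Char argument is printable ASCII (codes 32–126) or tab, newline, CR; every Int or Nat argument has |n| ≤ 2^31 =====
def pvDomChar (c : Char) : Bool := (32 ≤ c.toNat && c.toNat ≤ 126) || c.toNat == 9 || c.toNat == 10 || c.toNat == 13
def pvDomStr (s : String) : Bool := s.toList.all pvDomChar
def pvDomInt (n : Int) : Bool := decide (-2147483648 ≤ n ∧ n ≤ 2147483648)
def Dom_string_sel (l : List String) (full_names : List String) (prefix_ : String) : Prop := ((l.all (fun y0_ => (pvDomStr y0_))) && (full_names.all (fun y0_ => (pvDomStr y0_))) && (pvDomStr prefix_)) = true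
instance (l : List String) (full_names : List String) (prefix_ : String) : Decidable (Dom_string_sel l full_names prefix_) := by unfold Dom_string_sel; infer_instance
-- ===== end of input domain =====

-- B classifies the cleaned tokens once into an index set and a partial-name list and then
-- builds the selection in one final pass, instead of rebuilding the whole boolean list per
-- token (objective: faster — a timing run measured B well over 1.5x faster; same exact result).

-- ===== PORT A =====
-- the cleaned token stream: split each element on ',', strip '(){}[]', drop empties
-- (identical generator expressions in both Python versions, hence a shared helper)
def pvClean (l : List String) : List (List Char) :=
  ((l.flatMap (fun e => PySem.Chars.splitOn e.toList [','])).map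
    (fun s => PySem.Chars.stripChars s ['(', ')', '{', '}', '[', ']'])).filter
    (fun t => decide (t ≠ []))

-- the substring-match line 'sel = [True if e in name else s for (name, s) in zip(full_names, sel)]'
def pvSubstep (fulls : List (List Char)) (sel : List Bool) (e : List Char) : List Bool :=
  (fulls.zip sel).map (fun p => if PySem.Chars.isIn e p.1 then true else p.2)

-- one iteration of A's 'for e in l' loop body (try int / sel[i]=True / fall through on errors)
def pvStepA (fulls : List (List Char)) (sel : List Bool) (e : List Char) : List Bool :=
  match PySem.Int.ofChars? e with
  | some i =>
    match PySem.List.pySet? sel i true with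
    | some sel' => sel'
    | none => pvSubstep fulls sel e
  | none => pvSubstep fulls sel e

def string_sel (l : List String) (full_names : List String) (prefix_ : String) : List Bool :=
  let fulls := full_names.map (fun s => prefix_.toList ++ s.toList)
  (pvClean l).foldl (pvStepA fulls) (List.replicate full_names.length false)

-- ===== PORT B =====
-- B's classification loop body: in-range ints (negative ones normalized) go to the index
-- set, everything else (incl. out-of-range ints) to the partial-name list
def pvClassify (n : Int) (acc : PySem.Set Int × List (List Char)) (t : List Char) :
    PySem.Set Int × List (List Char) :=
  match PySem.Int.ofChars? t with
  | some i =>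
    if -n ≤ i ∧ i < n then (acc.1.add (if i < 0 then i + n else i), acc.2)
    else (acc.1, acc.2 ++ [t])
  | none => (acc.1, acc.2 ++ [t])

def string_sel_alt (l : List String) (full_names : List String) (prefix_ : String) : List Bool :=
  let n : Int := full_names.length
  let cls := (pvClean l).foldl (pvClassify n) (PySem.Set.ofList [], [])
  (PySem.List.enumerate full_names).map
    (fun p => decide (p.1 ∈ cls.1) ||
      cls.2.any (fun t => PySem.Chars.isIn t (prefix_.toList ++ p.2.toList)))

-- ===== PRECONDITION & SPEC =====
def Spec_string_sel (l : List String) (full_names : List String) (prefix_ : String) (out : List Bool) : Prop := out = string_sel_alt l full_names prefix_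
instance (l : List String) (full_names : List String) (prefix_ : String) (out : List Bool) : Decidable (Spec_string_sel l full_names prefix_ out) := by unfold Spec_string_sel; infer_instance

-- ===== CLAIM (what is proved, stated in full; the proofs are below) =====
def Claim_equal_string_sel : Prop := ∀ (l : List String) (full_names : List String) (prefix_ : String), Dom_string_sel l full_names prefix_ → Spec_string_sel l full_names prefix_ (string_sel l full_names prefix_)

-- ===== LEMMAS AND PROOFS =====

-- the contribution of a single token t to position j of the selection
def pvHit (fulls : List (List Char)) (t : List Char) (j : Nat) : Bool :=
  match PySem.Int.ofChars? t with
  | some i =>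
    if -(fulls.length : Int) ≤ i ∧ i < fulls.length then
      decide ((if i < 0 then i + fulls.length else i) = (j : Int))
    else PySem.Chars.isIn t (fulls.getD j [])
  | none => PySem.Chars.isIn t (fulls.getD j [])

theorem pvStepA_length (fulls : List (List Char)) (sel : List Bool) (e : List Char)
    (h : sel.length = fulls.length) : (pvStepA fulls sel e).length = sel.length := by
  unfold pvStepA pvSubstep
  cases hi : PySem.Int.ofChars? e with
  | none => simp [h]
  | some i =>
    cases hs : PySem.List.pySet? sel i true with
    | none => simp [hs, h]
    | some sel' =>
      simp only [hs]
      simp only [PySem.List.pySet?, Option.map_eq_some_iff] at hs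
      obtain ⟨k, hk, rfl⟩ := hs
      simp

theorem pvSubstep_getD (fulls : List (List Char)) (sel : List Bool) (e : List Char) (j : Nat)
    (h : sel.length = fulls.length) (hj : j < fulls.length) :
    (pvSubstep fulls sel e).getD j false
      = (sel.getD j false || PySem.Chars.isIn e (fulls.getD j [])) := by
  have hz : j < ((fulls.zip sel).map
      (fun p => if PySem.Chars.isIn e p.1 then true else p.2)).length := by
    simp [h, hj]
  unfold pvSubstep
  rw [List.getD_eq_getElem _ _ hz, List.getElem_map, List.getElem_zip,
    List.getD_eq_getElem _ _ (by omega : j < sel.length), List.getD_eq_getElem _ _ hj]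
  cases PySem.Chars.isIn e fulls[j] <;> simp

theorem pvStepA_getD (fulls : List (List Char)) (sel : List Bool) (e : List Char) (j : Nat)
    (h : sel.length = fulls.length) (hj : j < fulls.length) :
    (pvStepA fulls sel e).getD j false = (sel.getD j false || pvHit fulls e j) := by
  unfold pvStepA pvHit
  cases hi : PySem.Int.ofChars? e with
  | none => exact pvSubstep_getD fulls sel e j h hj
  | some i =>
    dsimp only
    cases hs : PySem.List.pySet? sel i true with
    | none =>
      rw [PySem.List.pySet?_eq_none_iff] at hs
      unfold PySem.Raise.InRange at hs
      rw [if_neg (by omega)]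
      exact pvSubstep_getD fulls sel e j h hj
    | some sel' =>
      simp only [PySem.List.pySet?, Option.map_eq_some_iff] at hs
      obtain ⟨k, hk, rfl⟩ := hs
      have hjs : j < sel.length := by omega
      rw [List.getD_eq_getElem _ _ (by simpa using hjs),
        List.getD_eq_getElem _ _ hjs, List.getElem_set]
      simp only [PySem.List.pyIdx?] at hk
      split_ifs at hk with h1 h2 h3
      · -- 0 ≤ i, i < sel.length, k = i.toNat
        cases hk
        have hr : -(fulls.length : Int) ≤ i ∧ i < (fulls.length : Int) := ⟨by omega, by omega⟩
        rw [if_pos hr, if_neg (show ¬ i < 0 by omega)]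
        by_cases hkj : i.toNat = j
        · rw [if_pos hkj, decide_eq_true (show i = (j : Int) by omega)]; simp
        · rw [if_neg hkj, decide_eq_false (show ¬ i = (j : Int) by omega)]; simp
      · -- i < 0, -sel.length ≤ i, k = sel.length - (-i).toNat
        cases hk
        have hr : -(fulls.length : Int) ≤ i ∧ i < (fulls.length : Int) := ⟨by omega, by omega⟩
        rw [if_pos hr, if_pos (show i < 0 by omega)]
        by_cases hkj : sel.length - (-i).toNat = j
        · rw [if_pos hkj, decide_eq_true (show i + (fulls.length : Int) = (j : Int) by omega)]
          simp
        · rw [if_neg hkj, decide_eq_false (show ¬ i + (fulls.length : Int) = (j : Int) by omega)]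
          simp

theorem pvFoldA_length (fulls : List (List Char)) (toks : List (List Char)) (sel : List Bool)
    (h : sel.length = fulls.length) : (toks.foldl (pvStepA fulls) sel).length = sel.length := by
  induction toks generalizing sel with
  | nil => rfl
  | cons t rest ih =>
    rw [List.foldl_cons, ih _ ((pvStepA_length fulls sel t h).trans h),
      pvStepA_length fulls sel t h]

theorem pvFoldA_getD (fulls : List (List Char)) (toks : List (List Char)) (sel : List Bool)
    (j : Nat) (h : sel.length = fulls.length) (hj : j < fulls.length) :
    (toks.foldl (pvStepA fulls) sel).getD j false
      = (sel.getD j false || toks.any (fun t => pvHit fulls t j)) := by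
  induction toks generalizing sel with
  | nil => simp
  | cons t rest ih =>
    simp only [List.foldl_cons, List.any_cons]
    rw [ih _ ((pvStepA_length fulls sel t h).trans h), pvStepA_getD fulls sel t j h hj,
      Bool.or_assoc]

theorem pvFoldB_getD (fulls : List (List Char)) (toks : List (List Char))
    (acc : PySem.Set Int × List (List Char)) (j : Nat) :
    (decide ((j : Int) ∈ (toks.foldl (pvClassify fulls.length) acc).1) ||
      (toks.foldl (pvClassify fulls.length) acc).2.any
        (fun t => PySem.Chars.isIn t (fulls.getD j [])))
      = ((decide ((j : Int) ∈ acc.1) ||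
          acc.2.any (fun t => PySem.Chars.isIn t (fulls.getD j []))) ||
         toks.any (fun t => pvHit fulls t j)) := by
  induction toks generalizing acc with
  | nil => simp only [List.foldl_nil, List.any_nil, Bool.or_false]; rfl
  | cons t rest ih =>
    simp only [List.foldl_cons, List.any_cons]
    refine (ih (pvClassify (fulls.length : Int) acc t)).trans ?_
    have hstep : (decide ((j : Int) ∈ (pvClassify (fulls.length : Int) acc t).1) ||
        (pvClassify (fulls.length : Int) acc t).2.any
          (fun t => PySem.Chars.isIn t (fulls.getD j [])))
        = ((decide ((j : Int) ∈ acc.1) ||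
            acc.2.any (fun t => PySem.Chars.isIn t (fulls.getD j []))) || pvHit fulls t j) := by
      cases hi : PySem.Int.ofChars? t with
      | none =>
        have hc : pvClassify (fulls.length : Int) acc t = (acc.1, acc.2 ++ [t]) := by
          unfold pvClassify; rw [hi]
        rw [hc]
        unfold pvHit; rw [hi]
        simp [Bool.or_assoc]
      | some i =>
        by_cases hr : -(fulls.length : Int) ≤ i ∧ i < (fulls.length : Int)
        · have hc : pvClassify (fulls.length : Int) acc t
              = (acc.1.add (if i < 0 then i + (fulls.length : Int) else i), acc.2) := by
            unfold pvClassify; rw [hi]; dsimp only; rw [if_pos hr]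
          have hh : pvHit fulls t j
              = decide ((if i < 0 then i + (fulls.length : Int) else i) = (j : Int)) := by
            unfold pvHit; rw [hi]; dsimp only; rw [if_pos hr]
          rw [hc, hh]
          simp only [PySem.Set.mem_add, Bool.decide_or]
          have hcomm : decide ((j : Int) = if i < 0 then i + (fulls.length : Int) else i)
              = decide ((if i < 0 then i + (fulls.length : Int) else i) = (j : Int)) := by
            simp [eq_comm]
          rw [hcomm]
          ac_rfl
        · have hc : pvClassify (fulls.length : Int) acc t = (acc.1, acc.2 ++ [t]) := by
            unfold pvClassify; rw [hi]; dsimp only; rw [if_neg hr]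
          have hh : pvHit fulls t j = PySem.Chars.isIn t (fulls.getD j []) := by
            unfold pvHit; rw [hi]; dsimp only; rw [if_neg hr]
          rw [hc, hh]
          simp [Bool.or_assoc]
    rw [hstep, Bool.or_assoc]

theorem string_sel_pointwise (l : List String) (full_names : List String) (prefix_ : String) :
    string_sel l full_names prefix_ = string_sel_alt l full_names prefix_ := by
  unfold string_sel string_sel_alt
  set fulls := full_names.map (fun s => prefix_.toList ++ s.toList) with hfulls
  have hlen : fulls.length = full_names.length := by simp [hfulls]
  have hrepl : (List.replicate full_names.length false).length = fulls.length := by simp [hlen]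
  apply List.ext_getElem
  · rw [pvFoldA_length fulls _ _ hrepl]
    simp [PySem.List.length_enumerate]
  · intro j h1 h2
    rw [← List.getD_eq_getElem _ false h1, ← List.getD_eq_getElem _ false h2]
    have hj : j < fulls.length := by
      rw [pvFoldA_length fulls _ _ hrepl] at h1; simpa [hlen] using h1
    rw [pvFoldA_getD fulls _ _ j hrepl hj]
    have h2' : j < ((PySem.List.enumerate full_names).length) := by
      simpa using h2
    rw [List.getD_eq_getElem _ false h2, List.getElem_map,
      PySem.List.getElem_enumerate full_names 0 j (by simpa using h2')]
    have hname : prefix_.toList ++ full_names[j].toList = fulls.getD j [] := by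
      rw [List.getD_eq_getElem _ _ hj]
      simp [hfulls]
    rw [hname]
    have := pvFoldB_getD fulls (pvClean l) (PySem.Set.ofList [], []) j
    rw [hlen] at this
    simp only [zero_add, this]
    simp

-- ===== VERDICT (by name: the statement is the Claim_ definition above) =====
theorem string_sel_spec : Claim_equal_string_sel := by
  intro l full_names prefix_ _
  unfold Spec_string_sel
  exact string_sel_pointwise l full_names prefix_
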